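-- pv_equiv track=rewrite | github.com/tmoldwin/DynamicalSystems | Toviah experiments/helper_functions.py | generate_cell_bounds
-- ===== SOURCE A (Python) =====
-- def generate_cell_bounds(cell_counts):
--     cell_bounds = {}
--     start = 0
--     for cell_type, count in cell_counts.items():
--         end = start + count
--         cell_bounds[cell_type] = (start, end)
--         start = end
--     return cell_bounds
-- ===== SOURCE B (Python) =====
-- def generate_cell_bounds(cell_counts):
--     # Divide and conquer: solve each half independently (each starting at 0),
--     # then rebase (shift) the right half's rows by the left half's total count.
--     # No running start is threaded anywhere.
--     def solve(items):
--         if not items: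
--             return [], 0
--         if len(items) == 1:
--             (k, c), = items
--             return [(k, 0, c)], c
--         mid = len(items) // 2
--         left, ltot = solve(items[:mid])
--         right, rtot = solve(items[mid:])
--         return left + [(k, s + ltot, e + ltot) for k, s, e in right], ltot + rtot
--     rows, _ = solve(list(cell_counts.items()))
--     return {k: (s, e) for k, s, e in rows}
-- ===== Notes on version B (the rewrite author's own statement) =====
-- stated objective: alternative
-- what changed: Instead of threading a running start through one dict-building loop, B solves the problem by divide and conquer: it recursively computes bounds for each half of the items starting at 0, then merges by rebasing (shifting) the right half's intervals by the left half's total count.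
import Mathlib
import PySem

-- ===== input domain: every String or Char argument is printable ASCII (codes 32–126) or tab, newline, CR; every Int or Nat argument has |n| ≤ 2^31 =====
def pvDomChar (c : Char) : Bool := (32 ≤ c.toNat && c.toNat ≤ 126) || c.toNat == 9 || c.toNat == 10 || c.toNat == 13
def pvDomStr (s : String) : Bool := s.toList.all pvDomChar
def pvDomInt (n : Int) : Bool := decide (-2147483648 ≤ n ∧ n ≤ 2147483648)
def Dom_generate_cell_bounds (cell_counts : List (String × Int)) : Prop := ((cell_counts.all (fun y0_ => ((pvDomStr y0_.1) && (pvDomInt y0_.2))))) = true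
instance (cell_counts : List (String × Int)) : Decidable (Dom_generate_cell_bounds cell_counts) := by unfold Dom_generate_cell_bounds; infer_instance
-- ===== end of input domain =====

-- B computes the bounds by divide and conquer (solve each half starting at 0, then
-- shift the right half by the left total) instead of A's single running-start loop.


-- ===== PORT A =====
-- for cell_type, count in cell_counts.items(): end = start + count; cell_bounds[cell_type] = (start, end); start = end
def generate_cell_bounds (cell_counts : List (String × Int)) : List (String × Int × Int) :=
  (cell_counts.foldl
    (fun (st : PySem.Dict String (Int × Int) × Int) p =>
      let endv := st.2 + p.2
      (st.1.insert p.1 (st.2, endv), endv))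
    (PySem.Dict.empty, 0)).1.items

-- ===== PORT B =====
-- def solve(items): [] -> ([],0); [one] -> ([(k,0,c)], c);
--   else split at len//2, solve halves, shift right rows by left total, concatenate.
-- (fuel = items.length bounds the recursion depth-first size; both recursive calls are on
-- strictly shorter lists, so the fuel is never exhausted — a totality guard only)
def gcbSolveF : Nat → List (String × Int) → List (String × Int × Int) × Int
  | _, [] => ([], 0)
  | _, [p] => ([(p.1, 0, p.2)], p.2)
  | 0, _ => ([], 0)  -- unreachable: fuel ≥ list length > 0 at every call
  | fuel + 1, p :: q :: rest =>
      let mid := (p :: q :: rest).length / 2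
      let left := gcbSolveF fuel ((p :: q :: rest).take mid)
      let right := gcbSolveF fuel ((p :: q :: rest).drop mid)
      (left.1 ++ right.1.map (fun t => (t.1, t.2.1 + left.2, t.2.2 + left.2)),
       left.2 + right.2)

def gcbSolve (items : List (String × Int)) : List (String × Int × Int) × Int :=
  gcbSolveF items.length items

-- return {k: (s, e) for k, s, e in rows}: for the distinct keys admitted by Pre_,
-- this dict comprehension is exactly the rows as an association list.
def generate_cell_bounds_alt (cell_counts : List (String × Int)) : List (String × Int × Int) :=
  (gcbSolve cell_counts).1

-- ===== PRECONDITION & SPEC =====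
-- Pre_ requires pairwise-distinct keys: the Python argument is a dict, which cannot hold
-- duplicate keys, so duplicate-key association lists represent no Python input at all.
def Pre_generate_cell_bounds (cell_counts : List (String × Int)) : Prop :=
  (cell_counts.map Prod.fst).Nodup
instance (cell_counts : List (String × Int)) : Decidable (Pre_generate_cell_bounds cell_counts) := by unfold Pre_generate_cell_bounds; infer_instance

def pvWitness_generate_cell_bounds : (List (String × Int)) := [("exc", 3), ("inh", 2)]

def Spec_generate_cell_bounds (cell_counts : List (String × Int)) (out : List (String × Int × Int)) : Prop := out = generate_cell_bounds_alt cell_counts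
instance (cell_counts : List (String × Int)) (out : List (String × Int × Int)) : Decidable (Spec_generate_cell_bounds cell_counts out) := by unfold Spec_generate_cell_bounds; infer_instance

-- ===== CLAIM (what is proved, stated in full; the proofs are below) =====
def Claim_equal_generate_cell_bounds : Prop := ∀ (cell_counts : List (String × Int)), Dom_generate_cell_bounds cell_counts → Pre_generate_cell_bounds cell_counts → Spec_generate_cell_bounds cell_counts (generate_cell_bounds cell_counts)

-- ===== LEMMAS AND PROOFS =====

-- Proof-only reference shape: the rows built front-to-back by structural recursion,
-- shifting the tail's rows by the head count.
def gcbRows (cc : List (String × Int)) : List (String × Int × Int) :=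
  cc.foldr (fun p acc => (p.1, 0, p.2) :: acc.map (fun t => (t.1, t.2.1 + p.2, t.2.2 + p.2))) []

theorem gcbRows_append (xs ys : List (String × Int)) :
    gcbRows (xs ++ ys)
      = gcbRows xs ++ (gcbRows ys).map
          (fun t => (t.1, t.2.1 + (xs.map Prod.snd).sum, t.2.2 + (xs.map Prod.snd).sum)) := by
  induction xs with
  | nil => simp [gcbRows]
  | cons p xs ih =>
      simp only [List.cons_append, gcbRows, List.foldr_cons] at ih ⊢
      rw [ih]
      simp only [List.map_append, List.map_map, List.map_cons,
        List.cons.injEq, List.append_cancel_left_eq, List.sum_cons]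
      refine ⟨trivial, ?_⟩
      apply List.map_congr_left
      intro t _
      simp only [Function.comp_apply, Prod.ext_iff]
      exact ⟨trivial, by ring, by ring⟩

theorem gcbSolveF_eq (fuel : Nat) :
    ∀ (cc : List (String × Int)), cc.length ≤ fuel →
      gcbSolveF fuel cc = (gcbRows cc, (cc.map Prod.snd).sum) := by
  induction fuel with
  | zero =>
      intro cc hle
      match cc with
      | [] => simp [gcbSolveF, gcbRows]
      | p :: _ => simp at hle
  | succ fuel ih =>
      intro cc hle
      match cc with
      | [] => simp [gcbSolveF, gcbRows]
      | [p] => simp [gcbSolveF, gcbRows]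
      | p :: q :: rest =>
          rw [gcbSolveF]
          have hlen : (p :: q :: rest).length = rest.length + 2 := by simp
          have htake : ((p :: q :: rest).take ((p :: q :: rest).length / 2)).length ≤ fuel := by
            simp only [List.length_take, List.length_cons] at *; omega
          have hdrop : ((p :: q :: rest).drop ((p :: q :: rest).length / 2)).length ≤ fuel := by
            simp only [List.length_drop, List.length_cons] at *; omega
          rw [ih _ htake, ih _ hdrop]
          have hsplit := List.take_append_drop ((p :: q :: rest).length / 2) (p :: q :: rest)
          conv_rhs => rw [← hsplit]
          rw [gcbRows_append]
          simp

theorem gcbSolve_eq (cc : List (String × Int)) :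
    gcbSolve cc = (gcbRows cc, (cc.map Prod.snd).sum) := by
  exact gcbSolveF_eq cc.length cc le_rfl

-- Loop invariant for A's fold: starting from dict d (whose keys avoid the remaining list)
-- and running start s, the resulting items are d.items followed by the rows for the
-- remaining list, rebased (shifted) by s.
theorem gcb_fold_invariant (cc : List (String × Int)) :
    ∀ (d : PySem.Dict String (Int × Int)) (s : Int),
      (∀ p ∈ cc, d.contains p.1 = false) → (cc.map Prod.fst).Nodup →
      (cc.foldl
        (fun (st : PySem.Dict String (Int × Int) × Int) p =>
          let endv := st.2 + p.2
          (st.1.insert p.1 (st.2, endv), endv))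
        (d, s)).1.items
      = d.items ++ (gcbRows cc).map (fun t => (t.1, t.2.1 + s, t.2.2 + s)) := by
  induction cc with
  | nil => intro d s _ _; simp [gcbRows]
  | cons p rest ih =>
      intro d s hfresh hnodup
      simp only [List.foldl_cons]
      have hfresh' : ∀ q ∈ rest, (d.insert p.1 (s, s + p.2)).contains q.1 = false := by
        intro q hq
        have hne : q.1 ≠ p.1 := by
          simp only [List.map_cons, List.nodup_cons] at hnodup
          intro hEq
          exact hnodup.1 (hEq ▸ List.mem_map_of_mem hq)
        rw [PySem.Dict.contains_insert]
        simp [hne, hfresh q (List.mem_cons_of_mem _ hq)]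
      have hnodup' : (rest.map Prod.fst).Nodup := by
        simp only [List.map_cons, List.nodup_cons] at hnodup; exact hnodup.2
      rw [ih (d.insert p.1 (s, s + p.2)) (s + p.2) hfresh' hnodup']
      rw [PySem.Dict.items_insert_of_not_contains (h := hfresh p (List.mem_cons_self ..))]
      simp only [gcbRows, List.foldr_cons, List.map_cons, List.map_map,
        List.append_assoc, List.cons_append, List.nil_append]
      congr 2
      · simp [Int.add_comm]
      · apply List.map_congr_left
        intro t _
        simp only [Function.comp_apply, Prod.ext_iff]
        exact ⟨trivial, by ring, by ring⟩

-- ===== VERDICT (by name: the statement is the Claim_ definition above) =====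
theorem generate_cell_bounds_spec : Claim_equal_generate_cell_bounds := by
  intro cc _ hpre
  unfold Spec_generate_cell_bounds generate_cell_bounds generate_cell_bounds_alt
  rw [gcb_fold_invariant cc PySem.Dict.empty 0 (by intro p _; rfl) hpre, gcbSolve_eq]
  show ([] : List (String × Int × Int)) ++ _ = _
  simp
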